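-- pv_equiv track=rewrite | github.com/nozerorma/PhyloPhere | subworkflows/PGLS/local/src/caas/pgls_runner.py | _first_tip_match
-- ===== SOURCE A (Python) =====
-- from typing import Dict, List, Set
--
-- def _first_tip_match(
--     species: str,
--     tip_set: Set[str],
--     sp2tax: Dict[str, str] | None,
--     taxid2names: Dict[str, Set[str]] | None = None,
-- ) -> str | None:
--     s = str(species).strip()
--     if s in tip_set:
--         return s
--     if sp2tax is not None:
--         tid = str(sp2tax.get(s, "")).strip()
--         if tid and tid in tip_set:
--             return tid
--         # Tree tips are binomial names, not taxon IDs.  Walk every known name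
--         # for this taxon (scientific name + all synonyms) and return the first
--         # that matches a tree tip.
--         if tid and taxid2names:
--             for name in taxid2names.get(tid, set()):
--                 if name in tip_set:
--                     return name
--     return None
-- ===== SOURCE B (Python) =====
-- def _first_tip_match(
--     species,
--     tip_set,
--     sp2tax,
--     taxid2names=None,
-- ):
--     # Inverted scan: build the ordered candidate list once, index each
--     # candidate by its first-occurrence rank, then scan the TIPS (not the
--     # candidates) and return the candidate of minimal rank seen among them.
--     s = str(species).strip()
--     cands = [s]
--     if sp2tax is not None:
--         tid = str(sp2tax.get(s, "")).strip()
--         if tid: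
--             cands.append(tid)
--             if taxid2names:
--                 cands.extend(taxid2names.get(tid, set()))
--     rank = {}
--     for i, c in enumerate(cands):
--         rank.setdefault(c, i)
--     best = min((rank[t] for t in tip_set if t in rank), default=None)
--     return None if best is None else cands[best]
-- ===== Notes on version B (the rewrite author's own statement) =====
-- stated objective: alternative
-- what changed: B inverts the scan direction: instead of testing each candidate against the tip set, it builds a rank index of the candidate list once and then scans the tips, returning the candidate whose rank is minimal among the tips found in the index.
import Mathlib
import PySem

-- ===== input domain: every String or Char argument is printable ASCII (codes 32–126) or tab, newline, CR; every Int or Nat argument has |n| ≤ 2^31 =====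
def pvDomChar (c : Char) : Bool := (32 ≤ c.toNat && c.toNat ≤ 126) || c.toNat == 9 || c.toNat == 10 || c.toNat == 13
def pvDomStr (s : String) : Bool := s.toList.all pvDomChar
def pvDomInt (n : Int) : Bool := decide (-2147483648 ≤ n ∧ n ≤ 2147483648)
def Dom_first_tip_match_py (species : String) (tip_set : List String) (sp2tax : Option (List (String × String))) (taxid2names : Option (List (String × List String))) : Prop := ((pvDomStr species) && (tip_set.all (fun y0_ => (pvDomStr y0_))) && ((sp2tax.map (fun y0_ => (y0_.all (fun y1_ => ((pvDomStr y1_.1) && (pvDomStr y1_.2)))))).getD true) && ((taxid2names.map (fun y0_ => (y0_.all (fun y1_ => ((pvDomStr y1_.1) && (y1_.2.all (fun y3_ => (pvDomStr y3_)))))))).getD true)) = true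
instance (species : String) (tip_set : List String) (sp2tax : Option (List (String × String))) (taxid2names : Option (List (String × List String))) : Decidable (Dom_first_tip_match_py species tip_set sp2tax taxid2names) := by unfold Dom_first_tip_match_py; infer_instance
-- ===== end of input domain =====

-- B inverts the scan: it indexes the candidate list by first-occurrence rank once and scans the TIPS for the minimal-rank candidate, instead of testing candidates against the tip set; same result, proved equal.


-- ===== PORT A =====
-- the for-loop over taxid2names.get(tid, set()) with an early return
def firstTipLoopA (names : List String) (tip_set : List String) : Option String :=
  match names with
  | [] => none
  | n :: rest => if n ∈ tip_set then some n else firstTipLoopA rest tip_set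

def first_tip_match_py (species : String) (tip_set : List String) (sp2tax : Option (List (String × String))) (taxid2names : Option (List (String × List String))) : Option String :=
  let s := PySem.Str.strip species
  if s ∈ tip_set then some s
  else
    match sp2tax with
    | none => none
    | some m =>
      let tid := PySem.Str.strip ((PySem.Dict.ofList m).getD s "")
      if tid ≠ "" ∧ tid ∈ tip_set then some tid
      else if tid ≠ "" ∧ (taxid2names.getD []) ≠ [] then
        firstTipLoopA ((PySem.Dict.ofList (taxid2names.getD [])).getD tid []) tip_set
      else none

-- ===== PORT B =====
-- rank.setdefault(c, i) for i, c in enumerate(cands): add (c, i) only if c is absent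
def rankBuild (d : List (String × Nat)) (i : Nat) : List String → List (String × Nat)
  | [] => d
  | c :: rest =>
      rankBuild (if (d.find? (fun p => p.1 == c)).isSome then d else d ++ [(c, i)]) (i + 1) rest

-- rank.get(t) on the association list (first match)
def rlook (d : List (String × Nat)) (t : String) : Option Nat :=
  (d.find? (fun p => p.1 == t)).map Prod.snd

def first_tip_match_py_alt (species : String) (tip_set : List String) (sp2tax : Option (List (String × String))) (taxid2names : Option (List (String × List String))) : Option String :=
  let s := PySem.Str.strip species
  let cands : List String :=
    s :: (match sp2tax with
      | none => []
      | some m =>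
        let tid := PySem.Str.strip ((PySem.Dict.ofList m).getD s "")
        if tid = "" then []
        else tid :: (match taxid2names with
          | none => []
          | some d => if d = [] then [] else (PySem.Dict.ofList d).getD tid []))
  let rank := rankBuild [] 0 cands
  let best := PySem.List.min? (tip_set.filterMap (fun t => rlook rank t)) (fun r => r)
  best.bind (fun r => PySem.List.pyGet? cands (r : Int))

-- ===== PRECONDITION & SPEC =====
def Spec_first_tip_match_py (species : String) (tip_set : List String) (sp2tax : Option (List (String × String))) (taxid2names : Option (List (String × List String))) (out : Option String) : Prop := out = first_tip_match_py_alt species tip_set sp2tax taxid2names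
instance (species : String) (tip_set : List String) (sp2tax : Option (List (String × String))) (taxid2names : Option (List (String × List String))) (out : Option String) : Decidable (Spec_first_tip_match_py species tip_set sp2tax taxid2names out) := by unfold Spec_first_tip_match_py; infer_instance

-- ===== CLAIM (what is proved, stated in full; the proofs are below) =====
def Claim_equal_first_tip_match_py : Prop := ∀ (species : String) (tip_set : List String) (sp2tax : Option (List (String × String))) (taxid2names : Option (List (String × List String))), Dom_first_tip_match_py species tip_set sp2tax taxid2names → Spec_first_tip_match_py species tip_set sp2tax taxid2names (first_tip_match_py species tip_set sp2tax taxid2names)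

-- ===== LEMMAS AND PROOFS =====
lemma loopA_eq_find? (names ts : List String) :
    firstTipLoopA names ts = names.find? (fun n => ts.contains n) := by
  induction names with
  | nil => rfl
  | cons n rest ih =>
    by_cases h : n ∈ ts <;> simp [firstTipLoopA, h, ih]

lemma rlook_append_single (d : List (String × Nat)) (c t : String) (i : Nat) :
    rlook (d ++ [(c, i)]) t = (rlook d t).orElse (fun _ => if c == t then some i else none) := by
  unfold rlook
  rw [List.find?_append]
  cases h : d.find? (fun p => p.1 == t) with
  | none => by_cases hc : c = t <;> simp [hc]
  | some p => simp

lemma map_shift (o : Option Nat) (i : Nat) :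
    (o.map (· + 1)).map (· + i) = o.map (· + (i + 1)) := by
  cases o with
  | none => rfl
  | some x => simp only [Option.map_some]; congr 1; omega

lemma idxOf?_cons_ne (c t : String) (cs : List String) (hc : c ≠ t) :
    (c :: cs).idxOf? t = (cs.idxOf? t).map (· + 1) := by
  simp [List.idxOf?, List.findIdx?_cons, hc]

lemma rlook_rankBuild (cs : List String) : ∀ (d : List (String × Nat)) (i : Nat) (t : String),
    rlook (rankBuild d i cs) t = (rlook d t).orElse (fun _ => (cs.idxOf? t).map (· + i)) := by
  induction cs with
  | nil => intro d i t; simp [rankBuild]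
  | cons c cs ih =>
    intro d i t
    rw [rankBuild, ih]
    by_cases hd : (d.find? (fun p => p.1 == c)).isSome = true
    · rw [if_pos hd]
      by_cases hc : c = t
      · subst hc
        unfold rlook
        cases h : d.find? (fun p => p.1 == c) with
        | none => simp [h] at hd
        | some p => simp [List.idxOf?]
      · rw [idxOf?_cons_ne c t cs hc, map_shift]
    · rw [if_neg hd, rlook_append_single]
      by_cases hc : c = t
      · subst hc
        have hn : rlook d c = none := by
          unfold rlook
          cases h : d.find? (fun p => p.1 == c) with
          | none => rfl
          | some p => simp [h] at hd
        simp [hn, List.idxOf?, List.findIdx?_cons]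
      · have hct : (c == t) = false := by simp [hc]
        simp only [hct, Bool.false_eq_true, if_false]
        rw [idxOf?_cons_ne c t cs hc, map_shift]
        cases rlook d t with
        | none => simp
        | some r => simp

lemma rlook_rank (cands : List String) (t : String) :
    rlook (rankBuild [] 0 cands) t = cands.idxOf? t := by
  rw [rlook_rankBuild]
  simp [rlook]

lemma find?_eq_findIdx?_bind (p : String → Bool) (l : List String) :
    l.find? p = (l.findIdx? p).bind (fun j => l[j]?) := by
  induction l with
  | nil => rfl
  | cons c cs ih =>
    by_cases h : p c
    · simp [List.findIdx?_cons, h]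
    · simp only [List.find?_cons, List.findIdx?_cons, h, Bool.false_eq_true, if_neg,
        not_false_iff, ih]
      cases hf : cs.findIdx? p with
      | none => simp
      | some j => simp

lemma min?_ranks_eq (cands tips : List String) :
    PySem.List.min? (tips.filterMap (fun t => cands.idxOf? t)) (fun r => r)
      = cands.findIdx? (fun c => tips.contains c) := by
  cases h : cands.findIdx? (fun c => tips.contains c) with
  | none =>
    rw [List.findIdx?_eq_none_iff] at h
    have hnil : tips.filterMap (fun t => cands.idxOf? t) = [] := by
      rw [List.filterMap_eq_nil_iff]
      intro t ht
      cases hi : cands.idxOf? t with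
      | none => rfl
      | some j =>
        rw [List.idxOf?_eq_some_iff] at hi
        obtain ⟨hjl, hget, _⟩ := hi
        have := h cands[j] (List.getElem_mem hjl)
        rw [hget] at this
        simp [ht] at this
    rw [hnil, PySem.List.min?_eq_none_iff]
  | some j =>
    rw [List.findIdx?_eq_some_iff_getElem] at h
    obtain ⟨hjl, hpj, hmin⟩ := h
    have hjmem : j ∈ tips.filterMap (fun t => cands.idxOf? t) := by
      rw [List.mem_filterMap]
      refine ⟨cands[j], ?_, ?_⟩
      · simpa [List.contains_iff_mem] using hpj
      · rw [List.idxOf?_eq_some_iff]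
        refine ⟨hjl, rfl, ?_⟩
        intro k hkj heq
        apply hmin k hkj
        rw [heq]
        exact hpj
    cases hm : PySem.List.min? (tips.filterMap (fun t => cands.idxOf? t)) (fun r => r) with
    | none =>
      rw [PySem.List.min?_eq_none_iff] at hm
      rw [hm] at hjmem
      simp at hjmem
    | some m =>
      have hmmem := PySem.List.min?_mem hm
      rw [List.mem_filterMap] at hmmem
      obtain ⟨t, ht, hidx⟩ := hmmem
      rw [List.idxOf?_eq_some_iff] at hidx
      obtain ⟨hml, hget, _⟩ := hidx
      have hjle : ¬ m < j := by
        intro hlt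
        apply hmin m hlt
        rw [hget]
        simpa [List.contains_iff_mem] using ht
      have hle : m ≤ j := PySem.List.min?_isMin hm j hjmem
      have : m = j := by omega
      rw [this]

lemma altCore (cands tips : List String) :
    (PySem.List.min? (tips.filterMap (fun t => rlook (rankBuild [] 0 cands) t)) (fun r => r)).bind
      (fun r => PySem.List.pyGet? cands (r : Int))
    = cands.find? (fun c => tips.contains c) := by
  simp only [rlook_rank, PySem.List.pyGet?_natCast, min?_ranks_eq]
  rw [find?_eq_findIdx?_bind]

-- ===== VERDICT (by name: the statement is the Claim_ definition above) =====
theorem first_tip_match_py_spec : Claim_equal_first_tip_match_py := by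
  intro species ts sp2tax t2n _
  unfold Spec_first_tip_match_py first_tip_match_py first_tip_match_py_alt
  simp only [altCore]
  by_cases hs : PySem.Str.strip species ∈ ts
  · simp [hs]
  · cases sp2tax with
    | none => simp [hs]
    | some m =>
      simp only
      by_cases ht0 : PySem.Str.strip ((PySem.Dict.ofList m).getD (PySem.Str.strip species) "") = ""
      · simp [hs, ht0]
      · by_cases ht : PySem.Str.strip ((PySem.Dict.ofList m).getD (PySem.Str.strip species) "") ∈ ts
        · simp [hs, ht0, ht]
        · cases t2n with
          | none => simp [hs, ht0, ht]
          | some d =>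
            by_cases hd : d = [] <;>
              simp [hs, ht0, ht, hd, loopA_eq_find?]
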